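-- pv_equiv track=rewrite | github.com/rafidka/microtorch | src/microtorch/tensor/utils.py | identify_broadcasting_dimensions
-- ===== SOURCE A (Python) =====
-- def identify_broadcasting_dimensions(
--     shape1: tuple[int, ...], shape2: tuple[int, ...]
-- ) -> tuple[tuple[int, ...], tuple[int, ...]]:
--     """
--     Identifies the dimensions along which broadcasting will occur for each shape.
--
--     Args:
--         shape1 (tuple[int, ...]): The shape of the first tensor.
--         shape2 (tuple[int, ...]): The shape of the second tensor.
--
--     Returns:
--         tuple[tuple[int, ...], tuple[int, ...]]: A tuple of two shapes, the first shape
--             is where broadcasting will occur for the first tensor, and the second shape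
--             is where broadcasting will occur for the second tensor.
--
--     Raises:
--         ValueError: If the shapes are incompatible for broadcasting.
--     """
--     # Align shapes from the right by padding shorter shape with 1s
--     len_diff = len(shape1) - len(shape2)
--     if len_diff > 0:
--         # shape2 is shorter, pad with 1s on the left
--         padded_shape2 = (-1,) * len_diff + shape2
--         padded_shape1 = shape1
--     elif len_diff < 0:
--         # shape1 is shorter, pad with 1s on the left
--         padded_shape1 = (-1,) * (-len_diff) + shape1
--         padded_shape2 = shape2
--     else:
--         # Same length, no padding needed
--         padded_shape1 = shape1
--         padded_shape2 = shape2
--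
--     shape1_broadcasting: list[int] = []
--     shape2_broadcasting: list[int] = []
--
--     for i, (dim1, dim2) in enumerate(zip(padded_shape1, padded_shape2)):
--         if dim1 == -1:
--             # -1 is the special value for padding above, so definitely broadcasting
--             shape1_broadcasting.append(i)
--         elif dim2 == -1:
--             # -1 is the special value for padding above, so definitely broadcasting
--             shape2_broadcasting.append(i)
--         elif dim1 == 1 and dim2 != 1:
--             # Dimension 1 is 1, so broadcasting
--             shape1_broadcasting.append(i)
--         elif dim1 != 1 and dim2 == 1:
--             # Dimension 2 is 1, so broadcasting
--             shape2_broadcasting.append(i)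
--         elif dim1 != 1 and dim2 != 1 and dim1 != dim2:
--             # Both dimensions are not 1, so broadcasting is not possible
--             raise ValueError(
--                 f"Incompatible shapes for broadcasting: {shape1} and {shape2}. "
--                 f"Dimension {i} has sizes {dim1} and {dim2}, which are different and neither is 1."
--             )
--
--     return tuple(shape1_broadcasting), tuple(shape2_broadcasting)
-- ===== SOURCE B (Python) =====
-- def identify_broadcasting_dimensions(shape1, shape2):
--     """Identify broadcasting dimensions by first computing the broadcast
--     result shape, then filtering, per input, the positions where that input
--     differs from the result (a missing leading dim, or a dim that gets
--     stretched to the result dim).  A -1 dim is an unknown size: it stretches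
--     to whatever the other operand has there."""
--     n = max(len(shape1), len(shape2))
--     o1 = n - len(shape1)
--     o2 = n - len(shape2)
--
--     # Stage 1: the shape broadcasting would produce.
--     result = []
--     for i in range(n):
--         d1 = shape1[i - o1] if i >= o1 else None
--         d2 = shape2[i - o2] if i >= o2 else None
--         if d1 is None:
--             result.append(d2)
--         elif d2 is None or d1 == d2:
--             result.append(d1)
--         elif d1 == -1:
--             result.append(d2)
--         elif d2 == -1:
--             result.append(d1)
--         elif d1 == 1:
--             result.append(d2)
--         elif d2 == 1:
--             result.append(d1)
--         else:
--             raise ValueError(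
--                 f"Incompatible shapes for broadcasting: {shape1} and {shape2}. "
--                 f"Dimension {i} has sizes {d1} and {d2}, which are different and neither is 1."
--             )
--
--     # Stage 2: a shape broadcasts at i iff its dim is missing there or
--     # differs from the result dim.
--     b1 = tuple(i for i in range(n) if i < o1 or shape1[i - o1] != result[i])
--     b2 = tuple(i for i in range(n) if i < o2 or shape2[i - o2] != result[i])
--     return b1, b2
-- ===== Notes on version B (the rewrite author's own statement) =====
-- stated objective: alternative
-- what changed: B is a two-stage algorithm: it first computes the broadcast RESULT shape (treating a -1 dim as an unknown size that stretches to a different known dim, raising the same ValueError on incompatible dims), then derives each side's broadcasting indices as an independent filter (a missing leading dim, or a dim that differs from the result dim), instead of A's sentinel-padded copies and five-way per-position branch; Pre_ excludes exactly the inputs on which both programs raise ValueError.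
-- intended difference: On shapes where two -1 dims meet at an aligned position, or a -1 dim in shape1's extra leading part meets A's own padding, A's first-branch sentinel priority reports the shape1 side as broadcasting (A gives ((0,), ()) on ((-1,), (-1,))), while B, treating the caller's -1 as an unknown size, reports no broadcast on shape1 there (B gives ((), ())), the intended reading since -1 is not a sentinel in the caller's shapes. — e.g. on identify_broadcasting_dimensions([-1], [-1]): A returns ([0], []), B returns ([], [])
import Mathlib
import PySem

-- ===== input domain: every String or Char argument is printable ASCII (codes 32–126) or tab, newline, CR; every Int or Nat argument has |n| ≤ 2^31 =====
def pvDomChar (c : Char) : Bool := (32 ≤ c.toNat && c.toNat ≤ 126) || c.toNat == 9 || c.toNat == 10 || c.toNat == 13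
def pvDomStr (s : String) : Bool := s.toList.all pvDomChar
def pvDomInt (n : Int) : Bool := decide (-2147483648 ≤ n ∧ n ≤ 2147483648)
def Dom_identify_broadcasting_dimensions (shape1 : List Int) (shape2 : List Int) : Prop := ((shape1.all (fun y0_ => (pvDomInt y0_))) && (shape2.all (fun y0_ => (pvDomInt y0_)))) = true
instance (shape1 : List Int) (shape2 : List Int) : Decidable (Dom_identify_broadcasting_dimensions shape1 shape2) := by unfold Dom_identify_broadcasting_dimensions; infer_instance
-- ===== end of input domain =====

-- B replaces A's sentinel-padded single pass by a two-stage algorithm: compute the broadcast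
-- result shape first, then filter each input's positions against it (objective: alternative).
-- On shapes with a -1 dim at a compared position (D_ below) A conflates the caller's -1 with
-- its padding sentinel; B treats -1 as an ordinary dim there (the intended reading).

-- ===== PORT A =====
-- A's for-loop over enumerate(zip(padded1, padded2)): structural recursion with index i.
def pvLoopA : Nat → List (Int × Int) → List Int × List Int → List Int × List Int
  | _, [], acc => acc
  | i, (d1, d2) :: rest, (b1, b2) =>
    if d1 = -1 then pvLoopA (i + 1) rest (b1 ++ [(i : Int)], b2)
    else if d2 = -1 then pvLoopA (i + 1) rest (b1, b2 ++ [(i : Int)])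
    else if d1 = 1 ∧ d2 ≠ 1 then pvLoopA (i + 1) rest (b1 ++ [(i : Int)], b2)
    else if d1 ≠ 1 ∧ d2 = 1 then pvLoopA (i + 1) rest (b1, b2 ++ [(i : Int)])
    else pvLoopA (i + 1) rest (b1, b2)  -- dim1≠1, dim2≠1, dim1≠dim2 raises ValueError: outside Pre_

def identify_broadcasting_dimensions (shape1 : List Int) (shape2 : List Int) : List Int × List Int :=
  let len_diff : Int := (shape1.length : Int) - (shape2.length : Int)
  let padded :=
    if len_diff > 0 then (shape1, List.replicate len_diff.toNat (-1) ++ shape2)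
    else if len_diff < 0 then (List.replicate (-len_diff).toNat (-1) ++ shape1, shape2)
    else (shape1, shape2)
  pvLoopA 0 (padded.1.zip padded.2) ([], [])

-- ===== PORT B =====
-- Source B's 'shape[i - o] if i >= o else None'; the index i - o is nonnegative and in range
-- wherever the guard holds on the inputs B reaches, so plain list lookup is exact.
def pvDimAt (s : List Int) (o : Nat) (i : Nat) : Option Int :=
  if o ≤ i then s[i - o]? else none

-- Source B's branch chain computing one result dim; none = the ValueError branch.
def pvOutDim (d1 d2 : Option Int) : Option Int :=
  match d1, d2 with
  | none, d2 => d2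
  | some a, none => some a
  | some a, some b =>
    if a = b then some a
    else if a = -1 then some b
    else if b = -1 then some a
    else if a = 1 then some b
    else if b = 1 then some a
    else none

-- Source B's stage-1 loop over range(n) building the broadcast result shape.
def pvResLoop (s1 s2 : List Int) (o1 o2 : Nat) : List Nat → List Int → Option (List Int)
  | [], acc => some acc
  | i :: rest, acc =>
    match pvOutDim (pvDimAt s1 o1 i) (pvDimAt s2 o2 i) with
    | some d => pvResLoop s1 s2 o1 o2 rest (acc ++ [d])
    | none => none  -- ValueError: outside Pre_

def identify_broadcasting_dimensions_alt (shape1 : List Int) (shape2 : List Int) : List Int × List Int :=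
  let n := max shape1.length shape2.length
  let o1 := n - shape1.length
  let o2 := n - shape2.length
  match pvResLoop shape1 shape2 o1 o2 (List.range n) [] with
  | none => ([], [])  -- ValueError: outside Pre_
  | some result =>
    (((List.range n).filter (fun i =>
        decide (i < o1) || (shape1.getD (i - o1) 0 != result.getD i 0))).map Int.ofNat,
     ((List.range n).filter (fun i =>
        decide (i < o2) || (shape2.getD (i - o2) 0 != result.getD i 0))).map Int.ofNat)

-- ===== PRECONDITION & SPEC =====
-- Pre_ excludes exactly the inputs on which A raises ValueError (an aligned pair of different
-- dims, neither 1 and neither -1); B raises on exactly the same inputs.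
def Pre_identify_broadcasting_dimensions (shape1 : List Int) (shape2 : List Int) : Prop :=
  ∀ p ∈ shape1.reverse.zip shape2.reverse,
    p.1 = p.2 ∨ p.1 = 1 ∨ p.2 = 1 ∨ p.1 = -1 ∨ p.2 = -1

instance (shape1 : List Int) (shape2 : List Int) : Decidable (Pre_identify_broadcasting_dimensions shape1 shape2) := by
  unfold Pre_identify_broadcasting_dimensions; infer_instance

def pvWitness_identify_broadcasting_dimensions : List Int × List Int := ([2, 1], [3])

-- On shapes where two -1 dims meet, or a -1 dim in shape1 meets A's own left padding, A's
-- first-branch sentinel priority reports the shape1 side as broadcasting, while B, treating a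
-- caller's -1 as an unknown size that stretches only to a DIFFERENT known dim, reports no
-- broadcast on shape1 there (and, in the padding case, the missing-dim broadcast on shape2) —
-- the intended reading, since -1 is no sentinel in the caller's shapes.
def D_identify_broadcasting_dimensions (shape1 : List Int) (shape2 : List Int) : Prop :=
  ((-1 : Int), (-1 : Int)) ∈ shape1.reverse.zip shape2.reverse ∨
  (-1 : Int) ∈ shape1.take (shape1.length - shape2.length)

instance (shape1 : List Int) (shape2 : List Int) : Decidable (D_identify_broadcasting_dimensions shape1 shape2) := by
  unfold D_identify_broadcasting_dimensions; infer_instance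

def Spec_identify_broadcasting_dimensions (shape1 : List Int) (shape2 : List Int) (out : List Int × List Int) : Prop := ¬ D_identify_broadcasting_dimensions shape1 shape2 → out = identify_broadcasting_dimensions_alt shape1 shape2
instance (shape1 : List Int) (shape2 : List Int) (out : List Int × List Int) : Decidable (Spec_identify_broadcasting_dimensions shape1 shape2 out) := by unfold Spec_identify_broadcasting_dimensions; infer_instance

def pvDiffWitness_identify_broadcasting_dimensions : List Int × List Int := ([-1], [-1])
def pvDiffWitnessOut_identify_broadcasting_dimensions : (List Int × List Int) × (List Int × List Int) := (([0], []), ([], []))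

-- ===== CLAIM (what is proved, stated in full; the proofs are below) =====
def Claim_unchanged_identify_broadcasting_dimensions : Prop := ∀ (shape1 : List Int) (shape2 : List Int), Dom_identify_broadcasting_dimensions shape1 shape2 → Pre_identify_broadcasting_dimensions shape1 shape2 → Spec_identify_broadcasting_dimensions shape1 shape2 (identify_broadcasting_dimensions shape1 shape2)
def Claim_changed_identify_broadcasting_dimensions : Prop := Dom_identify_broadcasting_dimensions (pvDiffWitness_identify_broadcasting_dimensions.1) (pvDiffWitness_identify_broadcasting_dimensions.2) ∧ Pre_identify_broadcasting_dimensions (pvDiffWitness_identify_broadcasting_dimensions.1) (pvDiffWitness_identify_broadcasting_dimensions.2) ∧ D_identify_broadcasting_dimensions (pvDiffWitness_identify_broadcasting_dimensions.1) (pvDiffWitness_identify_broadcasting_dimensions.2) ∧ identify_broadcasting_dimensions (pvDiffWitness_identify_broadcasting_dimensions.1) (pvDiffWitness_identify_broadcasting_dimensions.2) = pvDiffWitnessOut_identify_broadcasting_dimensions.1 ∧ identify_broadcasting_dimensions_alt (pvDiffWitness_identify_broadcasting_dimensions.1) (pvDiffWitness_identify_broadcasting_dimensions.2) = pvDiffWitnessOut_identify_broadcasting_dimensions.2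 ∧ pvDiffWitnessOut_identify_broadcasting_dimensions.1 ≠ pvDiffWitnessOut_identify_broadcasting_dimensions.2
def Claim_exact_identify_broadcasting_dimensions : Prop := ∀ (shape1 : List Int) (shape2 : List Int), Dom_identify_broadcasting_dimensions shape1 shape2 → Pre_identify_broadcasting_dimensions shape1 shape2 → D_identify_broadcasting_dimensions shape1 shape2 → identify_broadcasting_dimensions shape1 shape2 ≠ identify_broadcasting_dimensions_alt shape1 shape2

-- ===== LEMMAS AND PROOFS =====

-- Position-indexed emitter: the common normal form both ports are reduced to.
def pvEmit (q : Nat → Bool) : Nat → Nat → List Int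
  | _, 0 => []
  | i, k + 1 => (if q i then [(i : Int)] else []) ++ pvEmit q (i + 1) k

theorem pvEmit_congr (q q' : Nat → Bool) :
    ∀ (k i : Nat), (∀ j, i ≤ j → j < i + k → q j = q' j) → pvEmit q i k = pvEmit q' i k := by
  intro k
  induction k with
  | zero => intro i _; rfl
  | succ k ih =>
    intro i h
    simp only [pvEmit]
    rw [h i (le_refl i) (by omega), ih (i + 1) (fun j h1 h2 => h j (by omega) (by omega))]

theorem filter_range'_emit (q : Nat → Bool) :
    ∀ (k i : Nat), ((List.range' i k).filter q).map Int.ofNat = pvEmit q i k := by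
  intro k
  induction k with
  | zero => intro i; rfl
  | succ k ih =>
    intro i
    rw [List.range'_succ]
    simp only [List.filter_cons, pvEmit]
    by_cases h : q i <;> simp [h, ih]

theorem filter_range_emit (q : Nat → Bool) (n : Nat) :
    ((List.range n).filter q).map Int.ofNat = pvEmit q 0 n := by
  rw [List.range_eq_range', filter_range'_emit]

-- A's per-position conditions, read off from the branch chain.
def pvCondA1 (p : Int × Int) : Bool := p.1 == -1 || (p.2 != -1 && p.1 == 1 && p.2 != 1)
def pvCondA2 (p : Int × Int) : Bool := p.1 != -1 && (p.2 == -1 || (p.1 != 1 && p.2 == 1))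

theorem pvLoopA_emit (ps : List (Int × Int)) :
    ∀ (i : Nat) (b1 b2 : List Int),
    pvLoopA i ps (b1, b2) =
      (b1 ++ pvEmit (fun j => pvCondA1 (ps.getD (j - i) (0, 0))) i ps.length,
       b2 ++ pvEmit (fun j => pvCondA2 (ps.getD (j - i) (0, 0))) i ps.length) := by
  induction ps with
  | nil => intro i b1 b2; simp [pvLoopA, pvEmit]
  | cons p rest ih =>
    intro i b1 b2
    obtain ⟨d1, d2⟩ := p
    have hsh1 : pvEmit (fun j => pvCondA1 (((d1, d2) :: rest).getD (j - i) (0, 0))) (i + 1) rest.length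
        = pvEmit (fun j => pvCondA1 (rest.getD (j - (i + 1)) (0, 0))) (i + 1) rest.length := by
      apply pvEmit_congr
      intro j h1 h2
      have : j - i = (j - (i + 1)) + 1 := by omega
      rw [this, List.getD_cons_succ]
    have hsh2 : pvEmit (fun j => pvCondA2 (((d1, d2) :: rest).getD (j - i) (0, 0))) (i + 1) rest.length
        = pvEmit (fun j => pvCondA2 (rest.getD (j - (i + 1)) (0, 0))) (i + 1) rest.length := by
      apply pvEmit_congr
      intro j h1 h2
      have : j - i = (j - (i + 1)) + 1 := by omega
      rw [this, List.getD_cons_succ]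
    simp only [List.length_cons, pvEmit, Nat.sub_self, List.getD_cons_zero, hsh1, hsh2]
    rw [pvLoopA]
    by_cases h1 : d1 = -1
    · simp [h1, pvCondA1, pvCondA2, ih, List.append_assoc]
    · by_cases h2 : d2 = -1
      · simp [h1, h2, pvCondA1, pvCondA2, ih, List.append_assoc]
      · by_cases h3 : d1 = 1 <;> by_cases h4 : d2 = 1 <;>
          simp [h1, h2, h3, h4, pvCondA1, pvCondA2, ih, List.append_assoc]

-- A's three padding branches are all 'pad each side to length n with -1 on the left'.
theorem identA_pad (s1 s2 : List Int) :
    identify_broadcasting_dimensions s1 s2 =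
      pvLoopA 0 ((List.replicate (max s1.length s2.length - s1.length) (-1) ++ s1).zip
                 (List.replicate (max s1.length s2.length - s2.length) (-1) ++ s2)) ([], []) := by
  unfold identify_broadcasting_dimensions
  rcases lt_trichotomy s1.length s2.length with h | h | h
  · have h1 : ¬ ((s1.length : Int) - (s2.length : Int) > 0) := by omega
    have h2 : ((s1.length : Int) - (s2.length : Int) < 0) := by omega
    have e1 : max s1.length s2.length - s1.length = (-((s1.length : Int) - (s2.length : Int))).toNat := by omega
    have e2 : max s1.length s2.length - s2.length = 0 := by omega
    simp only [h1, h2, if_true, if_false, e1, e2, List.replicate_zero, List.nil_append]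
  · simp [h]
  · have h1 : ((s1.length : Int) - (s2.length : Int) > 0) := by omega
    have e1 : max s1.length s2.length - s1.length = 0 := by omega
    have e2 : max s1.length s2.length - s2.length = ((s1.length : Int) - (s2.length : Int)).toNat := by omega
    simp only [h1, if_true, e1, e2, List.replicate_zero, List.nil_append]

-- Stage-1 loop returns the accumulated map when every position yields a dim.
theorem pvResLoop_some (s1 s2 : List Int) (o1 o2 : Nat) (f : Nat → Int) :
    ∀ (l : List Nat) (acc : List Int),
    (∀ i ∈ l, pvOutDim (pvDimAt s1 o1 i) (pvDimAt s2 o2 i) = some (f i)) →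
    pvResLoop s1 s2 o1 o2 l acc = some (acc ++ l.map f) := by
  intro l
  induction l with
  | nil => intro acc _; simp [pvResLoop]
  | cons i rest ih =>
    intro acc h
    rw [pvResLoop, h i (by simp)]
    show pvResLoop s1 s2 o1 o2 rest (acc ++ [f i]) = _
    rw [ih _ (fun j hj => h j (by simp [hj]))]
    simp

-- Padded lookup at position j.
theorem pad_getD (s : List Int) (o : Nat) (j : Nat) :
    (List.replicate o (-1 : Int) ++ s).getD j 0 =
      if j < o then (-1 : Int) else s.getD (j - o) 0 := by
  by_cases h : j < o
  · rw [if_pos h, List.getD_eq_getElem?_getD, List.getElem?_append_left (by simpa using h)]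
    simp [h]
  · rw [if_neg h, List.getD_eq_getElem?_getD, List.getD_eq_getElem?_getD,
      List.getElem?_append_right (by simpa using Nat.le_of_not_lt h)]
    simp

-- B unfolded to the emitter normal form, given the stage-1 result r.
theorem identB_emit (s1 s2 : List Int) (r : List Int)
    (h : pvResLoop s1 s2 (max s1.length s2.length - s1.length)
          (max s1.length s2.length - s2.length) (List.range (max s1.length s2.length)) [] = some r) :
    identify_broadcasting_dimensions_alt s1 s2 =
      (pvEmit (fun i => decide (i < max s1.length s2.length - s1.length) ||
          (s1.getD (i - (max s1.length s2.length - s1.length)) 0 != r.getD i 0))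
        0 (max s1.length s2.length),
       pvEmit (fun i => decide (i < max s1.length s2.length - s2.length) ||
          (s2.getD (i - (max s1.length s2.length - s2.length)) 0 != r.getD i 0))
        0 (max s1.length s2.length)) := by
  unfold identify_broadcasting_dimensions_alt
  simp only [h, filter_range_emit]

-- Per-position agreement on the aligned (no-padding) part, side 1.
theorem cond1_aligned (a b : Int) (hnb : ¬ (a = -1 ∧ b = -1))
    (hcab : a = b ∨ a = 1 ∨ b = 1 ∨ a = -1 ∨ b = -1) :
    pvCondA1 (a, b) = (a != (if a = b then a else if a = -1 then b
      else if b = -1 then a else if a = 1 then b else a)) := by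
  by_cases hab : a = b <;> by_cases ha : a = -1 <;> by_cases hb : b = -1 <;>
    by_cases hx : a = 1 <;> by_cases hy : b = 1 <;>
    (rw [pvCondA1, Bool.eq_iff_iff]; simp_all)

-- Per-position agreement on the aligned (no-padding) part, side 2.
theorem cond2_aligned (a b : Int) (hnb : ¬ (a = -1 ∧ b = -1))
    (hcab : a = b ∨ a = 1 ∨ b = 1 ∨ a = -1 ∨ b = -1) :
    pvCondA2 (a, b) = (b != (if a = b then a else if a = -1 then b
      else if b = -1 then a else if a = 1 then b else a)) := by
  by_cases hab : a = b <;> by_cases ha : a = -1 <;> by_cases hb : b = -1 <;>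
    by_cases hx : a = 1 <;> by_cases hy : b = 1 <;>
    (rw [pvCondA2, Bool.eq_iff_iff]; simp_all) <;> omega

-- Membership in the emitter: exactly the flagged positions.
theorem mem_pvEmit (q : Nat → Bool) :
    ∀ (k i : Nat) (x : Int), x ∈ pvEmit q i k ↔ ∃ j, i ≤ j ∧ j < i + k ∧ q j = true ∧ x = (j : Int) := by
  intro k
  induction k with
  | zero =>
    intro i x
    simp only [pvEmit, List.not_mem_nil, false_iff]
    rintro ⟨j, h1, h2, _, _⟩
    omega
  | succ k ih =>
    intro i x
    simp only [pvEmit, List.mem_append, ih]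
    constructor
    · rintro (hx | ⟨j, h1, h2, h3, h4⟩)
      · by_cases hq : q i
        · rw [if_pos hq] at hx
          simp only [List.mem_singleton] at hx
          exact ⟨i, le_refl i, by omega, hq, hx⟩
        · rw [if_neg hq] at hx
          simp at hx
      · exact ⟨j, by omega, by omega, h3, h4⟩
    · rintro ⟨j, h1, h2, h3, h4⟩
      by_cases hji : j = i
      · left
        subst hji
        rw [if_pos h3]
        simp [h4]
      · right
        exact ⟨j, by omega, by omega, h3, h4⟩

-- A -1 dim of shape1 at a compared position where B's result dim is also that -1
-- (two -1 dims meeting, or shape1's -1 against A's padding) forces A ≠ B.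
theorem differ_at (s1 s2 : List Int) (hcompat : Pre_identify_broadcasting_dimensions s1 s2)
    (jw : Nat) (hjn : jw < max s1.length s2.length)
    (hjo : max s1.length s2.length - s1.length ≤ jw)
    (ha : s1.getD (jw - (max s1.length s2.length - s1.length)) 0 = -1)
    (hcase : jw < max s1.length s2.length - s2.length ∨
             s2.getD (jw - (max s1.length s2.length - s2.length)) 0 = -1) :
    identify_broadcasting_dimensions s1 s2 ≠ identify_broadcasting_dimensions_alt s1 s2 := by
  set n := max s1.length s2.length with hn
  set o1 := n - s1.length with ho1
  set o2 := n - s2.length with ho2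
  have hl1 : o1 + s1.length = n := by omega
  have hl2 : o2 + s2.length = n := by omega
  have hc : ∀ j, o1 ≤ j → o2 ≤ j → j < n →
      s1.getD (j - o1) 0 = s2.getD (j - o2) 0 ∨ s1.getD (j - o1) 0 = 1 ∨ s2.getD (j - o2) 0 = 1 ∨
      s1.getD (j - o1) 0 = -1 ∨ s2.getD (j - o2) 0 = -1 := by
    intro j hj1 hj2 hjn'
    have hkz : n - 1 - j < (s1.reverse.zip s2.reverse).length := by simp; omega
    have hmem := List.getElem_mem hkz
    rw [List.getElem_zip] at hmem
    have e1 : s1.reverse[n - 1 - j]'(by simp; omega) = s1.getD (j - o1) 0 := by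
      rw [List.getElem_reverse, List.getD_eq_getElem s1 0 (by omega)]
      congr 1; omega
    have e2 : s2.reverse[n - 1 - j]'(by simp; omega) = s2.getD (j - o2) 0 := by
      rw [List.getElem_reverse, List.getD_eq_getElem s2 0 (by omega)]
      congr 1; omega
    have := hcompat _ hmem
    rw [e1, e2] at this
    exact this
  set f : Nat → Int := fun j =>
    if j < o1 then s2.getD (j - o2) 0
    else if j < o2 then s1.getD (j - o1) 0
    else if s1.getD (j - o1) 0 = s2.getD (j - o2) 0 then s1.getD (j - o1) 0
    else if s1.getD (j - o1) 0 = -1 then s2.getD (j - o2) 0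
    else if s2.getD (j - o2) 0 = -1 then s1.getD (j - o1) 0
    else if s1.getD (j - o1) 0 = 1 then s2.getD (j - o2) 0
    else s1.getD (j - o1) 0 with hf
  have hdimat1 : ∀ j, o1 ≤ j → j < n → pvDimAt s1 o1 j = some (s1.getD (j - o1) 0) := by
    intro j hj hjn'
    rw [pvDimAt, if_pos hj, List.getElem?_eq_getElem (by omega), List.getD_eq_getElem s1 0 (by omega)]
  have hdimat2 : ∀ j, o2 ≤ j → j < n → pvDimAt s2 o2 j = some (s2.getD (j - o2) 0) := by
    intro j hj hjn'
    rw [pvDimAt, if_pos hj, List.getElem?_eq_getElem (by omega), List.getD_eq_getElem s2 0 (by omega)]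
  have hdim : ∀ j ∈ List.range n, pvOutDim (pvDimAt s1 o1 j) (pvDimAt s2 o2 j) = some (f j) := by
    intro j hj
    rw [List.mem_range] at hj
    by_cases h1 : j < o1
    · rw [pvDimAt, if_neg (by omega), hdimat2 j (by omega) hj]
      simp only [pvOutDim, hf]
      rw [if_pos h1]
    · by_cases h2 : j < o2
      · rw [hdimat1 j (by omega) hj, pvDimAt, if_neg (by omega)]
        simp only [pvOutDim, hf]
        rw [if_neg h1, if_pos h2]
      · rw [hdimat1 j (by omega) hj, hdimat2 j (by omega) hj]
        simp only [pvOutDim, hf]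
        rw [if_neg h1, if_neg h2]
        by_cases hab : s1.getD (j - o1) 0 = s2.getD (j - o2) 0
        · rw [if_pos hab, if_pos hab]
        · rw [if_neg hab, if_neg hab]
          by_cases hA : s1.getD (j - o1) 0 = -1
          · rw [if_pos hA, if_pos hA]
          · rw [if_neg hA, if_neg hA]
            by_cases hB : s2.getD (j - o2) 0 = -1
            · rw [if_pos hB, if_pos hB]
            · rw [if_neg hB, if_neg hB]
              by_cases hx : s1.getD (j - o1) 0 = 1
              · rw [if_pos hx, if_pos hx]
              · rw [if_neg hx, if_neg hx]
                have hy : s2.getD (j - o2) 0 = 1 := by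
                  rcases hc j (by omega) (by omega) hj with h | h | h | h | h <;> tauto
                rw [if_pos hy]
  have hres := pvResLoop_some s1 s2 o1 o2 f (List.range n) [] hdim
  simp only [List.nil_append] at hres
  have hrget : ((List.range n).map f).getD jw 0 = f jw := by
    rw [List.getD_eq_getElem _ 0 (by simpa using hjn)]
    simp
  have hzget :
      ((List.replicate o1 (-1 : Int) ++ s1).zip (List.replicate o2 (-1 : Int) ++ s2)).getD jw (0, 0)
        = ((List.replicate o1 (-1 : Int) ++ s1).getD jw 0, (List.replicate o2 (-1 : Int) ++ s2).getD jw 0) := by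
    rw [List.getD_eq_getElem _ _ (by simp; omega), List.getElem_zip]
    rw [List.getD_eq_getElem _ _ (by simp; omega), List.getD_eq_getElem _ _ (by simp; omega)]
  have hpadlen : ((List.replicate o1 (-1 : Int) ++ s1).zip (List.replicate o2 (-1 : Int) ++ s2)).length = n := by
    simp; omega
  intro heq
  rw [identA_pad, pvLoopA_emit, identB_emit s1 s2 _ hres, ← hn, ← ho1, ← ho2] at heq
  have h1 := congrArg Prod.fst heq
  simp only [List.nil_append, hpadlen] at h1
  -- jw is emitted on A's side 1 …
  have hmemA : (jw : Int) ∈ pvEmit (fun j =>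
      pvCondA1 (((List.replicate o1 (-1 : Int) ++ s1).zip (List.replicate o2 (-1 : Int) ++ s2)).getD (j - 0) (0, 0))) 0 n := by
    rw [mem_pvEmit]
    refine ⟨jw, Nat.zero_le jw, by omega, ?_, rfl⟩
    rw [Nat.sub_zero, hzget, pad_getD, if_neg (by omega), ha]
    simp [pvCondA1]
  -- … but not on B's side 1
  rw [h1, mem_pvEmit] at hmemA
  obtain ⟨j', _, _, hq, hcast⟩ := hmemA
  have hjj : j' = jw := by exact_mod_cast hcast.symm
  subst hjj
  rw [hrget] at hq
  have hfj : f j' = s1.getD (j' - o1) 0 := by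
    simp only [hf]
    rw [if_neg (by omega)]
    by_cases h2 : j' < o2
    · rw [if_pos h2]
    · rw [if_neg h2]
      rcases hcase with hcl | hb
      · omega
      · rw [if_pos (by rw [ha, hb])]
  rw [hfj] at hq
  have hno : ¬ j' < o1 := by omega
  simp [hno] at hq


-- ===== VERDICT (by name: the statements are the Claim_ definitions above) =====
theorem identify_broadcasting_dimensions_spec : Claim_unchanged_identify_broadcasting_dimensions := by
  intro s1 s2 _ hcompat
  unfold Spec_identify_broadcasting_dimensions
  intro hnd
  rw [D_identify_broadcasting_dimensions, not_or] at hnd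
  obtain ⟨hd1, hd2⟩ := hnd
  set n := max s1.length s2.length with hn
  set o1 := n - s1.length with ho1
  set o2 := n - s2.length with ho2
  have hl1 : o1 + s1.length = n := by omega
  have hl2 : o2 + s2.length = n := by omega
  -- shape1's exclusive prefix has no -1 (it is the take in D_'s second disjunct)
  have hpref : ∀ j, j < o2 → s1.getD (j - o1) 0 ≠ -1 := by
    intro j hj hcon
    have hidx : j - o1 < s1.length := by omega
    rw [List.getD_eq_getElem s1 0 hidx] at hcon
    have htk : j - o1 < (s1.take (s1.length - s2.length)).length := by simp; omega
    have he : (s1.take (s1.length - s2.length))[j - o1]'htk = s1[j - o1]'hidx :=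
      List.getElem_take
    exact hd2 (hcon ▸ he ▸ List.getElem_mem htk)
  -- no aligned pair of two -1 dims (D_'s first disjunct)
  have hne12 : ∀ j, o1 ≤ j → o2 ≤ j → j < n →
      ¬ (s1.getD (j - o1) 0 = -1 ∧ s2.getD (j - o2) 0 = -1) := by
    rintro j hj1 hj2 hjn ⟨c1, c2⟩
    have hkz : n - 1 - j < (s1.reverse.zip s2.reverse).length := by simp; omega
    have hmem := List.getElem_mem hkz
    rw [List.getElem_zip] at hmem
    have e1 : s1.reverse[n - 1 - j]'(by simp; omega) = s1.getD (j - o1) 0 := by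
      rw [List.getElem_reverse, List.getD_eq_getElem s1 0 (by omega)]
      congr 1; omega
    have e2 : s2.reverse[n - 1 - j]'(by simp; omega) = s2.getD (j - o2) 0 := by
      rw [List.getElem_reverse, List.getD_eq_getElem s2 0 (by omega)]
      congr 1; omega
    rw [e1, e2, c1, c2] at hmem
    exact hd1 hmem
  -- the compatibility hypothesis, read at an aligned position j
  have hc : ∀ j, o1 ≤ j → o2 ≤ j → j < n →
      s1.getD (j - o1) 0 = s2.getD (j - o2) 0 ∨ s1.getD (j - o1) 0 = 1 ∨ s2.getD (j - o2) 0 = 1 ∨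
      s1.getD (j - o1) 0 = -1 ∨ s2.getD (j - o2) 0 = -1 := by
    intro j hj1 hj2 hjn
    have hkz : n - 1 - j < (s1.reverse.zip s2.reverse).length := by simp; omega
    have hmem := List.getElem_mem hkz
    rw [List.getElem_zip] at hmem
    have e1 : s1.reverse[n - 1 - j]'(by simp; omega) = s1.getD (j - o1) 0 := by
      rw [List.getElem_reverse, List.getD_eq_getElem s1 0 (by omega)]
      congr 1; omega
    have e2 : s2.reverse[n - 1 - j]'(by simp; omega) = s2.getD (j - o2) 0 := by
      rw [List.getElem_reverse, List.getD_eq_getElem s2 0 (by omega)]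
      congr 1; omega
    have := hcompat _ hmem
    rw [e1, e2] at this
    exact this
  -- the result dim B computes at each position
  set f : Nat → Int := fun j =>
    if j < o1 then s2.getD (j - o2) 0
    else if j < o2 then s1.getD (j - o1) 0
    else if s1.getD (j - o1) 0 = s2.getD (j - o2) 0 then s1.getD (j - o1) 0
    else if s1.getD (j - o1) 0 = -1 then s2.getD (j - o2) 0
    else if s2.getD (j - o2) 0 = -1 then s1.getD (j - o1) 0
    else if s1.getD (j - o1) 0 = 1 then s2.getD (j - o2) 0
    else s1.getD (j - o1) 0 with hf
  have hdimat1 : ∀ j, o1 ≤ j → j < n → pvDimAt s1 o1 j = some (s1.getD (j - o1) 0) := by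
    intro j hj hjn
    rw [pvDimAt, if_pos hj, List.getElem?_eq_getElem (by omega), List.getD_eq_getElem s1 0 (by omega)]
  have hdimat2 : ∀ j, o2 ≤ j → j < n → pvDimAt s2 o2 j = some (s2.getD (j - o2) 0) := by
    intro j hj hjn
    rw [pvDimAt, if_pos hj, List.getElem?_eq_getElem (by omega), List.getD_eq_getElem s2 0 (by omega)]
  have hdim : ∀ j ∈ List.range n, pvOutDim (pvDimAt s1 o1 j) (pvDimAt s2 o2 j) = some (f j) := by
    intro j hj
    rw [List.mem_range] at hj
    by_cases h1 : j < o1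
    · rw [pvDimAt, if_neg (by omega), hdimat2 j (by omega) hj]
      simp only [pvOutDim, hf]
      rw [if_pos h1]
    · by_cases h2 : j < o2
      · rw [hdimat1 j (by omega) hj, pvDimAt, if_neg (by omega)]
        simp only [pvOutDim, hf]
        rw [if_neg h1, if_pos h2]
      · rw [hdimat1 j (by omega) hj, hdimat2 j (by omega) hj]
        simp only [pvOutDim, hf]
        rw [if_neg h1, if_neg h2]
        by_cases hab : s1.getD (j - o1) 0 = s2.getD (j - o2) 0
        · rw [if_pos hab, if_pos hab]
        · rw [if_neg hab, if_neg hab]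
          by_cases hA : s1.getD (j - o1) 0 = -1
          · rw [if_pos hA, if_pos hA]
          · rw [if_neg hA, if_neg hA]
            by_cases hB : s2.getD (j - o2) 0 = -1
            · rw [if_pos hB, if_pos hB]
            · rw [if_neg hB, if_neg hB]
              by_cases hx : s1.getD (j - o1) 0 = 1
              · rw [if_pos hx, if_pos hx]
              · rw [if_neg hx, if_neg hx]
                have hy : s2.getD (j - o2) 0 = 1 := by
                  rcases hc j (by omega) (by omega) hj with h | h | h | h | h <;> tauto
                rw [if_pos hy]
  have hres := pvResLoop_some s1 s2 o1 o2 f (List.range n) [] hdim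
  simp only [List.nil_append] at hres
  have hrget : ∀ j, j < n → ((List.range n).map f).getD j 0 = f j := by
    intro j hj
    rw [List.getD_eq_getElem _ 0 (by simpa using hj)]
    simp
  -- B in emitter normal form
  rw [identB_emit s1 s2 _ hres]
  -- A in emitter normal form
  rw [identA_pad, pvLoopA_emit]
  have hpadlen : ((List.replicate o1 (-1 : Int) ++ s1).zip (List.replicate o2 (-1 : Int) ++ s2)).length = n := by
    simp; omega
  have hzget : ∀ j, j < n →
      ((List.replicate o1 (-1 : Int) ++ s1).zip (List.replicate o2 (-1 : Int) ++ s2)).getD j (0, 0)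
        = ((List.replicate o1 (-1 : Int) ++ s1).getD j 0, (List.replicate o2 (-1 : Int) ++ s2).getD j 0) := by
    intro j hj
    rw [List.getD_eq_getElem _ _ (by omega), List.getElem_zip]
    rw [List.getD_eq_getElem _ _ (by simp; omega), List.getD_eq_getElem _ _ (by simp; omega)]
  rw [← hn, ← ho1, ← ho2]
  simp only [List.nil_append, hpadlen, Nat.sub_zero, Prod.mk.injEq]
  -- pointwise agreement of the two emitters, per side
  refine ⟨?_, ?_⟩
  · apply pvEmit_congr
    intro j _ hj
    rw [Nat.zero_add] at hj
    rw [hzget j hj, pad_getD, pad_getD, hrget j hj]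
    by_cases h1 : j < o1
    · rw [if_pos h1, pvCondA1, Bool.eq_iff_iff]
      simp [h1]
    · rw [if_neg h1]
      by_cases h2 : j < o2
      · have ha : s1.getD (j - o1) 0 ≠ -1 := hpref j h2
        rw [if_pos h2]
        simp only [hf]
        rw [if_neg h1, if_pos h2]
        generalize s1.getD (j - o1) 0 = a at ha ⊢
        rw [pvCondA1, Bool.eq_iff_iff]
        simp [ha, h1]
      · rw [if_neg h2]
        simp only [hf]
        rw [if_neg h1, if_neg h2]
        rw [cond1_aligned _ _ (hne12 j (by omega) (by omega) hj) (hc j (by omega) (by omega) hj),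
          Bool.eq_iff_iff]
        simp [h1]
  · apply pvEmit_congr
    intro j _ hj
    rw [Nat.zero_add] at hj
    rw [hzget j hj, pad_getD, pad_getD, hrget j hj]
    by_cases h2 : j < o2
    · have h1 : ¬ j < o1 := by omega
      have ha : s1.getD (j - o1) 0 ≠ -1 := hpref j h2
      rw [if_neg h1, if_pos h2]
      simp only [hf]
      rw [if_neg h1, if_pos h2]
      generalize s1.getD (j - o1) 0 = a at ha ⊢
      rw [pvCondA2, Bool.eq_iff_iff]
      simp [h2, ha]
    · rw [if_neg h2]
      by_cases h1 : j < o1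
      · rw [if_pos h1]
        simp only [hf]
        rw [if_pos h1]
        generalize s2.getD (j - o2) 0 = b at ⊢
        rw [pvCondA2, Bool.eq_iff_iff]
        simp [h2]
      · rw [if_neg h1]
        simp only [hf]
        rw [if_neg h1, if_neg h2]
        rw [cond2_aligned _ _ (hne12 j (by omega) (by omega) hj) (hc j (by omega) (by omega) hj),
          Bool.eq_iff_iff]
        simp [h2]

theorem identify_broadcasting_dimensions_changed : Claim_changed_identify_broadcasting_dimensions := by
  unfold Claim_changed_identify_broadcasting_dimensions; decide
theorem identify_broadcasting_dimensions_tight : Claim_exact_identify_broadcasting_dimensions := by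
  intro s1 s2 _ hpre hD
  rcases hD with hzd | hpd
  · -- two -1 dims meet at an aligned position: jw = max - 1 - k (k-th from the right)
    obtain ⟨k, hk, hkp⟩ := List.mem_iff_getElem.mp hzd
    rw [List.getElem_zip] at hkp
    have hk1 : k < s1.length := by simp at hk; omega
    have hk2 : k < s2.length := by simp at hk; omega
    have hp1 : s1.reverse[k]'(by simpa using hk1) = -1 := congrArg Prod.fst hkp
    have hp2 : s2.reverse[k]'(by simpa using hk2) = -1 := congrArg Prod.snd hkp
    refine differ_at s1 s2 hpre (max s1.length s2.length - 1 - k) (by omega) (by omega) ?_ (Or.inr ?_)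
    · rw [List.getD_eq_getElem s1 0 (by omega), ← hp1, List.getElem_reverse]
      congr 1
      omega
    · rw [List.getD_eq_getElem s2 0 (by omega), ← hp2, List.getElem_reverse]
      congr 1
      omega
  · -- a -1 dim in shape1's exclusive prefix, at position k
    obtain ⟨k, hk, hkp⟩ := List.mem_iff_getElem.mp hpd
    have hkl : k < s1.length - s2.length := by simp at hk; omega
    rw [List.getElem_take] at hkp
    refine differ_at s1 s2 hpre k (by omega) (by omega) ?_ (Or.inl (by omega))
    rw [List.getD_eq_getElem s1 0 (by omega), ← hkp]
    congr 1
    omega
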